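-- pv_equiv track=rewrite | github.com/AMAURYCU/Unranking_of_partitions | lah_partitions/tests.py | well_formed
-- ===== SOURCE A (Python) =====
-- def well_formed(n, p):
--     """
--     check that p is a well formed lah partition of [|n|]:
--     - fa x in [|n|], x is in exactly one block of p
--     - each block of p contains at least 1 element
--     - p is in canonical form
--     - x in p => x in [|n|]
--     """
--     d = {i:False for i in range(1,n+1)}
--     old_block = [0]
--     for block in p:
--         if block == []:
--             return False
--         for elt in block:
--             if elt < 1 or elt > n:
--                 return False
--             if d[elt]:
--                 return False
--             d[elt] = True
--         if not min(old_block) < min(block):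
--              return False
--         old_block = block
--
--
--     return True
-- ===== SOURCE B (Python) =====
-- def well_formed(n, p):
--     if any(not block for block in p):
--         return False
--     elems = [e for block in p for e in block]
--     if elems and (min(elems) < 1 or max(elems) > n):
--         return False
--     if len(set(elems)) != len(elems):
--         return False
--     mins = [min(block) for block in p]
--     return mins == sorted(mins)
-- ===== Notes on version B (the rewrite author's own statement) =====
-- stated objective: alternative
-- what changed: Replaces A's stateful single pass (pre-built {1..n: False} dict, sentinel-[0] running min comparison) with four declarative whole-collection checks: no empty block, min/max of the flattened elements bound the range, set-cardinality equality for distinctness, and the list of block minimums equal to its own sort for monotonicity.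
import Mathlib
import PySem

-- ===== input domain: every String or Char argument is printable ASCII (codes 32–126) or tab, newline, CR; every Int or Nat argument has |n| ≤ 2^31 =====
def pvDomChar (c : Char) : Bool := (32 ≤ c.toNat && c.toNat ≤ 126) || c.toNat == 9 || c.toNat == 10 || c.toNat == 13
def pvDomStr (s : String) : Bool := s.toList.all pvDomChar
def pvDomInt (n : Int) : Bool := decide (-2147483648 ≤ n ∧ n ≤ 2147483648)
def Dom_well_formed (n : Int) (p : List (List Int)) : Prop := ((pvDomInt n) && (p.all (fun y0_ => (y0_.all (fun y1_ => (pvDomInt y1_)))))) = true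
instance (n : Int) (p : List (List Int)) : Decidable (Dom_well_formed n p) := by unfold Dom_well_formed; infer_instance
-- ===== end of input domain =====

-- B replaces A's stateful single pass (pre-built {1..n: False} dict, sentinel-[0] running-min
-- comparison) with four declarative whole-collection checks on the flattened elements and the
-- list of block minimums (objective: alternative).

-- ===== PORT A =====
-- inner 'for elt in block' loop; Python's d[elt] cannot raise KeyError here (the range
-- check 1 ≤ elt ≤ n precedes it and d holds every key of 1..n), so getD is exact.
def wfA_inner (n : Int) : List Int → PySem.Dict Int Bool → Option (PySem.Dict Int Bool)
  | [], d => some d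
  | e :: rest, d =>
    if e < 1 ∨ e > n then none
    else if d.getD e false then none
    else wfA_inner n rest (d.insert e true)

-- outer 'for block in p' loop; min(block)/min(old_block) via PySem.List.min? (the lists are nonempty here)
def wfA_outer (n : Int) : List (List Int) → PySem.Dict Int Bool → List Int → Bool
  | [], _, _ => true
  | block :: rest, d, old =>
    if block = [] then false
    else
      match wfA_inner n block d with
      | none => false
      | some d' =>
        match PySem.List.min? old (fun x => x), PySem.List.min? block (fun x => x) with
        | some mo, some mb => if ¬ (mo < mb) then false else wfA_outer n rest d' block
        | _, _ => false

-- the dict comprehension {i: False for i in range(1, n+1)}: keys are distinct and in order,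
-- so it is literally the association list [(i, False) for i in range(1, n+1)]
def well_formed (n : Int) (p : List (List Int)) : Bool :=
  wfA_outer n p
    (PySem.Dict.mk ((PySem.List.pyRange 1 (n + 1) 1).map (fun i => (i, false))))
    [0]

-- ===== PORT B =====
def well_formed_alt (n : Int) (p : List (List Int)) : Bool :=
  -- if any(not block for block in p): return False
  if p.any (fun block => block = []) then false
  else
    -- elems = [e for block in p for e in block]
    let elems := p.flatMap (fun block => block)
    -- if elems and (min(elems) < 1 or max(elems) > n): return False
    -- (min/max are only evaluated when elems is nonempty, i.e. when min?/max? are some)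
    if (match PySem.List.min? elems (fun x => x), PySem.List.max? elems (fun x => x) with
        | some mn, some mx => decide (mn < 1) || decide (n < mx)
        | _, _ => false) then false
    -- if len(set(elems)) != len(elems): return False
    else if (PySem.Set.ofList elems).length ≠ elems.length then false
    else
      -- mins = [min(block) for block in p]; min cannot raise here: every block is nonempty
      let mins := p.map (fun block => (PySem.List.min? block (fun x => x)).getD 0)
      -- return mins == sorted(mins)
      decide (mins = PySem.List.sorted mins (fun x => x))

-- ===== PRECONDITION & SPEC =====
def Spec_well_formed (n : Int) (p : List (List Int)) (out : Bool) : Prop := out = well_formed_alt n p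
instance (n : Int) (p : List (List Int)) (out : Bool) : Decidable (Spec_well_formed n p out) := by unfold Spec_well_formed; infer_instance

-- ===== CLAIM (what is proved, stated in full; the proofs are below) =====
def Claim_equal_well_formed : Prop := ∀ (n : Int) (p : List (List Int)), Dom_well_formed n p → Spec_well_formed n p (well_formed n p)

-- ===== LEMMAS AND PROOFS =====

-- the minimum of a block, as both ports compute it (0 only on an empty block, never reached)
def pmin (b : List Int) : Int := (PySem.List.min? b (fun x => x)).getD 0

-- the common characterisation both programs are proved equal to
def Good (n : Int) (p : List (List Int)) : Prop :=
  (∀ b ∈ p, b ≠ []) ∧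
  (∀ e ∈ p.flatMap (fun b => b), 1 ≤ e ∧ e ≤ n) ∧
  (p.flatMap (fun b => b)).Nodup ∧
  List.IsChain (· < ·) (0 :: p.map pmin)

-- the initial dict {1..n: False} answers false everywhere
lemma getD_init (e : Int) : ∀ l : List Int,
    (PySem.Dict.mk (l.map (fun i => (i, false)))).getD e false = false := by
  intro l
  induction l with
  | nil => rfl
  | cons a t ih =>
      rw [List.map_cons, PySem.Dict.getD_eq_get?_getD, PySem.Dict.get?_mk_cons]
      split
      · rfl
      · rw [← PySem.Dict.getD_eq_get?_getD]; exact ih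

-- A's inner loop: succeeds iff the block is fresh and in range; on success the dict models S ++ block
lemma innerA (n : Int) : ∀ (block : List Int) (d : PySem.Dict Int Bool) (S : List Int),
    (∀ e, d.getD e false = decide (e ∈ S)) →
    ((wfA_inner n block d).isSome ↔ (block.Nodup ∧ ∀ e ∈ block, 1 ≤ e ∧ e ≤ n ∧ e ∉ S)) ∧
    (∀ d', wfA_inner n block d = some d' →
      ∀ e, d'.getD e false = decide (e ∈ S ++ block)) := by
  intro block
  induction block with
  | nil =>
      intro d S h
      refine ⟨by simp [wfA_inner], ?_⟩
      intro d' hd' e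
      simp only [wfA_inner, Option.some.injEq] at hd'
      subst hd'; simpa using h e
  | cons a rest ih =>
      intro d S h
      by_cases hr : a < 1 ∨ a > n
      · refine ⟨?_, ?_⟩
        · simp only [wfA_inner, if_pos hr, Option.isSome_none, Bool.false_eq_true, false_iff]
          rintro ⟨-, hall⟩
          have := hall a (List.mem_cons_self)
          omega
        · intro d' hd'; simp [wfA_inner, if_pos hr] at hd'
      · by_cases hm : a ∈ S
        · have hd : d.getD a false = true := by rw [h]; simp [hm]
          refine ⟨?_, ?_⟩
          · simp only [wfA_inner, if_neg hr, hd, if_pos, Option.isSome_none, Bool.false_eq_true,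
              false_iff]
            rintro ⟨-, hall⟩
            exact absurd hm (hall a List.mem_cons_self).2.2
          · intro d' hd'; simp [wfA_inner, hd] at hd'
        · have hd : d.getD a false = false := by rw [h]; simp [hm]
          have hrel : ∀ e, (d.insert a true).getD e false = decide (e ∈ S ++ [a]) := by
            intro e
            rw [PySem.Dict.getD_insert]
            by_cases he : e = a
            · subst he; simp
            · simp [he, h e]
          obtain ⟨ih1, ih2⟩ := ih (d.insert a true) (S ++ [a]) hrel
          have hstep : wfA_inner n (a :: rest) d = wfA_inner n rest (d.insert a true) := by
            simp [wfA_inner, if_neg hr, hd]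
          refine ⟨?_, ?_⟩
          · rw [hstep, ih1]
            constructor
            · rintro ⟨hnd, hall⟩
              refine ⟨List.nodup_cons.mpr ⟨?_, hnd⟩, ?_⟩
              · intro hmem
                have := (hall a hmem).2.2
                simp at this
              · intro e he
                rcases List.mem_cons.mp he with rfl | he
                · exact ⟨by omega, by omega, hm⟩
                · have := hall e he
                  refine ⟨this.1, this.2.1, ?_⟩
                  intro hc; exact this.2.2 (by simp [hc])
            · rintro ⟨hnd, hall⟩
              obtain ⟨hna, hnd⟩ := List.nodup_cons.mp hnd
              refine ⟨hnd, ?_⟩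
              intro e he
              have := hall e (List.mem_cons_of_mem _ he)
              refine ⟨this.1, this.2.1, ?_⟩
              simp only [List.mem_append, List.mem_singleton]
              push_neg
              refine ⟨this.2.2, ?_⟩
              rintro rfl; exact hna he
          · intro d' hd' e
            rw [hstep] at hd'
            have := ih2 d' hd' e
            rw [this]
            simp [List.mem_append]

-- A's outer loop equals the characterisation, generalised over the dict model and the running min
lemma outerA (n : Int) : ∀ (p : List (List Int)) (d : PySem.Dict Int Bool) (S : List Int)
    (old : List Int) (mo : Int),
    (∀ e, d.getD e false = decide (e ∈ S)) →
    PySem.List.min? old (fun x => x) = some mo →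
    (wfA_outer n p d old = true ↔
      ((∀ b ∈ p, b ≠ []) ∧
       (∀ e ∈ p.flatMap (fun b => b), 1 ≤ e ∧ e ≤ n ∧ e ∉ S) ∧
       (p.flatMap (fun b => b)).Nodup ∧
       List.IsChain (· < ·) (mo :: p.map pmin))) := by
  intro p
  induction p with
  | nil =>
      intro d S old mo _ _
      simp [wfA_outer]
  | cons block rest ih =>
      intro d S old mo hrel hold
      by_cases hb : block = []
      · subst hb
        simp [wfA_outer]
      · obtain ⟨hi1, hi2⟩ := innerA n block d S hrel
        cases hA : wfA_inner n block d with
        | none =>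
            have hbad : ¬ (block.Nodup ∧ ∀ e ∈ block, 1 ≤ e ∧ e ≤ n ∧ e ∉ S) := by
              rw [← hi1, hA]; simp
            constructor
            · intro hc
              simp only [wfA_outer, if_neg hb, hA] at hc
              exact absurd hc (by simp)
            · rintro ⟨-, hall, hnd, -⟩
              exfalso
              apply hbad
              refine ⟨((List.nodup_append).mp (by simpa [List.flatMap_cons] using hnd)).1, ?_⟩
              intro e he
              exact hall e (by simp [List.flatMap_cons, he])
        | some d' =>
            have hgoodblk : block.Nodup ∧ ∀ e ∈ block, 1 ≤ e ∧ e ≤ n ∧ e ∉ S := by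
              rw [← hi1, hA]; simp
            obtain ⟨mb, hmb⟩ : ∃ mb, PySem.List.min? block (fun x => x) = some mb := by
              cases hmm : PySem.List.min? block (fun x => x) with
              | none => exact absurd ((PySem.List.min?_eq_none_iff _ _).mp hmm) hb
              | some m => exact ⟨m, rfl⟩
            have hpmin : pmin block = mb := by simp [pmin, hmb]
            have hrel' := hi2 d' hA
            by_cases hlt : mo < mb
            · have hrec := ih d' (S ++ block) block mb hrel' hmb
              simp only [wfA_outer, if_neg hb, hA, hold, hmb, if_neg (not_not_intro hlt)]
              rw [hrec]
              constructor
              · rintro ⟨hne, hall, hnd, hch⟩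
                refine ⟨?_, ?_, ?_, ?_⟩
                · intro b hbmem
                  rcases List.mem_cons.mp hbmem with rfl | hh
                  · exact hb
                  · exact hne b hh
                · intro e he
                  rw [List.flatMap_cons] at he
                  rcases List.mem_append.mp he with he | he
                  · exact hgoodblk.2 e he
                  · have := hall e he
                    refine ⟨this.1, this.2.1, fun hc => this.2.2 (List.mem_append.mpr (Or.inl hc))⟩
                · rw [List.flatMap_cons, List.nodup_append]
                  refine ⟨hgoodblk.1, hnd, ?_⟩
                  intro x hx y hy hxy
                  exact (hall y hy).2.2 (List.mem_append.mpr (Or.inr (hxy ▸ hx)))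

                · rw [List.map_cons, hpmin]
                  exact List.IsChain.cons_cons hlt hch
              · rintro ⟨hne, hall, hnd, hch⟩
                rw [List.flatMap_cons, List.nodup_append] at hnd
                obtain ⟨hnb, hnr, hdisj⟩ := hnd
                rw [List.map_cons, hpmin, List.isChain_cons_cons] at hch
                refine ⟨fun b hh => hne b (List.mem_cons_of_mem _ hh), ?_, hnr, hch.2⟩
                intro e he
                have := hall e (by rw [List.flatMap_cons]; exact List.mem_append_right _ he)
                refine ⟨this.1, this.2.1, ?_⟩
                intro hc
                rcases List.mem_append.mp hc with hc | hc
                · exact this.2.2 hc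
                · exact hdisj e hc e he rfl
            · simp only [wfA_outer, if_neg hb, hA, hold, hmb, if_pos hlt]
              simp only [Bool.false_eq_true, false_iff]
              rintro ⟨-, -, -, hch⟩
              rw [List.map_cons, hpmin, List.isChain_cons_cons] at hch
              exact hlt hch.1

-- A equals the characterisation
lemma A_iff (n : Int) (p : List (List Int)) : well_formed n p = true ↔ Good n p := by
  unfold well_formed Good
  rw [outerA n p _ [] [0] 0 (fun e => by rw [getD_init]; simp) (by decide)]
  constructor
  · rintro ⟨h1, h2, h3, h4⟩
    exact ⟨h1, fun e he => ⟨(h2 e he).1, (h2 e he).2.1⟩, h3, h4⟩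
  · rintro ⟨h1, h2, h3, h4⟩
    exact ⟨h1, fun e he => ⟨(h2 e he).1, (h2 e he).2, by simp⟩, h3, h4⟩

-- set(xs) has the same size as xs exactly when xs has no duplicates
lemma ofList_len_iff {α : Type} [DecidableEq α] : ∀ xs : List α,
    (PySem.Set.ofList xs).length = xs.length ↔ xs.Nodup := by
  intro xs
  induction xs using List.reverseRecOn with
  | nil => simp
  | append_singleton ys a ih =>
      have hstep : PySem.Set.ofList (ys ++ [a]) = PySem.Set.add (PySem.Set.ofList ys) a := by
        rw [PySem.Set.ofList_eq_foldl, PySem.Set.ofList_eq_foldl, List.foldl_append]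
        rfl
      rw [hstep, List.length_append, List.nodup_append]
      have hmem : a ∈ PySem.Set.ofList ys ↔ a ∈ ys := PySem.Set.mem_ofList ..
      by_cases hm : a ∈ PySem.Set.ofList ys
      · have hadd : PySem.Set.add (PySem.Set.ofList ys) a = PySem.Set.ofList ys := by
          simp [PySem.Set.add, PySem.Set.contains, hm]
        rw [hadd]
        have hle : (PySem.Set.ofList ys).length ≤ ys.length := PySem.Set.length_ofList_le ys
        have hma : a ∈ ys := hmem.mp hm
        constructor
        · intro hc
          exfalso
          simp only [List.length_singleton] at hc
          omega
        · rintro ⟨-, -, hdisj⟩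
          exact absurd rfl (hdisj a hma a (List.mem_singleton_self a))
      · have hadd : PySem.Set.add (PySem.Set.ofList ys) a = PySem.Set.ofList ys ++ [a] := by
          simp [PySem.Set.add, PySem.Set.contains, hm]
        rw [hadd, List.length_append]
        have hma : a ∉ ys := fun hc => hm (hmem.mpr hc)
        simp only [List.length_singleton, Nat.add_right_cancel_iff]
        rw [ih]
        constructor
        · intro h
          refine ⟨h, List.nodup_singleton a, ?_⟩
          intro x hx b hb
          rw [List.mem_singleton] at hb
          subst hb
          rintro rfl
          exact hma hx
        · rintro ⟨h, -, -⟩; exact h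

-- B equals the characterisation
lemma B_iff (n : Int) (p : List (List Int)) : well_formed_alt n p = true ↔ Good n p := by
  unfold well_formed_alt Good
  by_cases hne : ∀ b ∈ p, b ≠ []
  case neg =>
    have hany : p.any (fun block => block = []) = true := by
      push_neg at hne
      obtain ⟨b, hb, hbe⟩ := hne
      exact List.any_eq_true.mpr ⟨b, hb, by simp [hbe]⟩
    rw [if_pos hany]
    simp only [Bool.false_eq_true, false_iff]
    rintro ⟨h1, -⟩; exact hne h1
  case pos =>
    have hany : p.any (fun block => block = []) = false := by
      rw [List.any_eq_false]
      intro b hb; simpa using hne b hb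
    rw [if_neg (by simp [hany])]
    set elems := p.flatMap (fun b => b) with helems
    -- the range guard is false exactly when every element lies in [1, n]
    by_cases hrange : ∀ e ∈ elems, 1 ≤ e ∧ e ≤ n
    case neg =>
      have hne' : elems ≠ [] := by
        intro hc; rw [hc] at hrange; simp at hrange
      obtain ⟨mn, hmn⟩ : ∃ mn, PySem.List.min? elems (fun x => x) = some mn := by
        cases hmm : PySem.List.min? elems (fun x => x) with
        | none => exact absurd ((PySem.List.min?_eq_none_iff _ _).mp hmm) hne'
        | some m => exact ⟨m, rfl⟩
      obtain ⟨mx, hmx⟩ : ∃ mx, PySem.List.max? elems (fun x => x) = some mx := by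
        cases hmm : PySem.List.max? elems (fun x => x) with
        | none => exact absurd ((PySem.List.max?_eq_none_iff _ _).mp hmm) hne'
        | some m => exact ⟨m, rfl⟩
      push_neg at hrange
      obtain ⟨e, he, hbad⟩ := hrange
      have hguard : (mn < 1 ∨ n < mx) := by
        by_cases h1 : e < 1
        · left; exact lt_of_le_of_lt (PySem.List.min?_isMin hmn e he) h1
        · right
          have := PySem.List.max?_isMax hmx e he
          have : e ≤ mx := this
          omega
      rw [if_pos (by rw [hmn, hmx]; rcases hguard with h | h <;> simp [h])]
      simp only [Bool.false_eq_true, false_iff]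
      rintro ⟨-, h2, -⟩
      rcases hguard with h | h
      · have := h2 mn (PySem.List.min?_mem hmn); omega
      · have := h2 mx (PySem.List.max?_mem hmx); omega
    case pos =>
      have hguard : (match PySem.List.min? elems (fun x => x), PySem.List.max? elems (fun x => x) with
          | some mn, some mx => decide (mn < 1) || decide (n < mx)
          | _, _ => false) = false := by
        cases hmn : PySem.List.min? elems (fun x => x) with
        | none => cases PySem.List.max? elems (fun x => x) <;> rfl
        | some mn =>
            cases hmx : PySem.List.max? elems (fun x => x) with
            | none => rfl
            | some mx =>
                have h1 := hrange mn (PySem.List.min?_mem hmn)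
                have h2 := hrange mx (PySem.List.max?_mem hmx)
                simp only [Bool.or_eq_false_iff, decide_eq_false_iff_not]
                omega
      rw [if_neg (by simp [hguard])]
      by_cases hnd : elems.Nodup
      case neg =>
        rw [if_pos (fun hc => hnd ((ofList_len_iff elems).mp hc))]
        simp only [Bool.false_eq_true, false_iff]
        rintro ⟨-, -, h3, -⟩; exact hnd h3
      case pos =>
        rw [if_neg (not_not_intro ((ofList_len_iff elems).mpr hnd))]
        set mins := p.map (fun block => (PySem.List.min? block (fun x => x)).getD 0) with hmins
        have hmins_eq : mins = p.map pmin := rfl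
        -- every block minimum lies in its block, hence in elems
        have hmin_mem : ∀ b ∈ p, pmin b ∈ b := by
          intro b hb
          obtain ⟨m, hm⟩ : ∃ m, PySem.List.min? b (fun x => x) = some m := by
            cases hmm : PySem.List.min? b (fun x => x) with
            | none => exact absurd ((PySem.List.min?_eq_none_iff _ _).mp hmm) (hne b hb)
            | some m => exact ⟨m, rfl⟩
          rw [pmin, hm]
          exact PySem.List.min?_mem hm
        -- block minimums are pairwise distinct: the blocks are pairwise disjoint
        have hdisj : p.Pairwise (fun a b => ∀ x ∈ a, x ∉ b) := by
          have : (p.flatMap (fun b => b)).Nodup := hnd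
          rw [show p.flatMap (fun b => b) = p.flatten by simp [List.flatMap_def],
              List.nodup_flatten] at this
          exact this.2.imp (fun h x hx hx' => h hx hx')
        have hminsne : mins.Pairwise (· ≠ ·) := by
          rw [hmins_eq, List.pairwise_map]
          refine hdisj.imp_of_mem ?_
          intro a b ha hb h hc
          exact h (pmin a) (hmin_mem a ha) (hc ▸ hmin_mem b hb)
        have hminpos : ∀ m ∈ mins, 0 < m := by
          intro m hm
          rw [hmins_eq, List.mem_map] at hm
          obtain ⟨b, hb, rfl⟩ := hm
          have := hrange (pmin b) (by simp only [helems, List.mem_flatMap]; exact ⟨b, hb, hmin_mem b hb⟩)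
          omega
        constructor
        · intro hsor
          have hsor' : mins = PySem.List.sorted mins (fun x => x) := by simpa using hsor
          have hple : mins.Pairwise (· ≤ ·) := by
            have := PySem.List.sorted_pairwise (xs := mins) (key := fun x => x)
            rw [← hsor'] at this
            exact this
          have hplt : mins.Pairwise (· < ·) :=
            (hple.and hminsne).imp (fun h => lt_of_le_of_ne h.1 h.2)
          refine ⟨hne, hrange, hnd, ?_⟩
          rw [← hmins_eq, List.isChain_iff_pairwise, List.pairwise_cons]
          exact ⟨hminpos, hplt⟩
        · rintro ⟨-, -, -, hch⟩
          rw [← hmins_eq, List.isChain_iff_pairwise, List.pairwise_cons] at hch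
          have : PySem.List.sorted mins (fun x => x) = mins :=
            PySem.List.sorted_eq_self_of_pairwise mins (fun x => x) (hch.2.imp le_of_lt)
          simp [this]

-- ===== VERDICT (by name: the statement is the Claim_ definition above) =====
theorem well_formed_spec : Claim_equal_well_formed := by
  intro n p _
  unfold Spec_well_formed
  by_cases h : Good n p
  · rw [(A_iff n p).mpr h, ((B_iff n p).mpr h)]
  · have hA : well_formed n p = false := by
      cases hc : well_formed n p
      · rfl
      · exact absurd ((A_iff n p).mp hc) h
    have hB : well_formed_alt n p = false := by
      cases hc : well_formed_alt n p
      · rfl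
      · exact absurd ((B_iff n p).mp hc) h
    rw [hA, hB]
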